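-- pv_equiv track=rewrite | github.com/HenriqueDomiciano/projetosEulereOutros | Euler 1-10/exercicio5 euler.py | divisivel
-- ===== SOURCE A (Python) =====
-- def divisivel(a):
--     c=0
--     if a%2 !=0 :
--         return False
--     for b in range (20,10,-1):
--         n=a%b
--         if n==0:
--             pass
--         else :
--             return False
--     return True
-- ===== SOURCE B (Python) =====
-- def divisivel(a):
--     # closed form: divisible by all of 11..20 iff divisible by lcm(11..20)
--     return a % 232792560 == 0
-- ===== Notes on version B (the rewrite author's own statement) =====
-- stated objective: simpler
-- what changed: Replaced the parity guard plus descending loop over divisors 20..11 by a single modulo test against lcm(11..20)=232792560.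
import Mathlib
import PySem

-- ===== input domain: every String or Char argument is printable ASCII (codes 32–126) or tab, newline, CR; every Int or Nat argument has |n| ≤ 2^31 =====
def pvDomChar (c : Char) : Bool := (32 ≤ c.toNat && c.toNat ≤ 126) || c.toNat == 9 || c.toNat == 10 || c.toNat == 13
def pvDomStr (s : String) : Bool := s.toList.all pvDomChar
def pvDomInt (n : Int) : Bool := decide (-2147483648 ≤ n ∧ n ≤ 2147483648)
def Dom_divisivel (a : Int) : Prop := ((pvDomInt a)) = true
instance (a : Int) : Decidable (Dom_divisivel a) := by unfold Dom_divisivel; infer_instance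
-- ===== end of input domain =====

-- B replaces the parity check and the descending divisor loop by one modulo test against lcm(11..20) = 232792560 (simpler, same result).
-- ===== PORT A =====
-- literal port of A: parity check, then the descending for-loop with early return
def divisivelLoop (a : Int) : List Int → Bool
  | [] => true
  | b :: bs => if PySem.Int.mod a b == 0 then divisivelLoop a bs else false

def divisivel (a : Int) : Bool :=
  if PySem.Int.mod a 2 != 0 then false
  else divisivelLoop a (PySem.List.pyRange 20 10 (-1))

-- ===== PORT B =====
-- B: one modulo against lcm(11..20)
def divisivel_alt (a : Int) : Bool := PySem.Int.mod a 232792560 == 0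

-- ===== PRECONDITION & SPEC =====
def Spec_divisivel (a : Int) (out : Bool) : Prop := out = divisivel_alt a
instance (a : Int) (out : Bool) : Decidable (Spec_divisivel a out) := by unfold Spec_divisivel; infer_instance

-- ===== CLAIM (what is proved, stated in full; the proofs are below) =====
def Claim_equal_divisivel : Prop := ∀ (a : Int), Dom_divisivel a → Spec_divisivel a (divisivel a)

-- ===== LEMMAS AND PROOFS =====
theorem divisivelLoop_eq_true_iff (a : Int) (l : List Int) :
    divisivelLoop a l = true ↔ ∀ b ∈ l, PySem.Int.mod a b = 0 := by
  induction l with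
  | nil => simp [divisivelLoop]
  | cons b bs ih =>
    by_cases h : PySem.Int.mod a b = 0 <;> simp [divisivelLoop, h, ih]

theorem dvd_lcm_of_all (a : Int) (h16 : (16:Int)∣a) (h18 : (18:Int)∣a) (h20 : (20:Int)∣a)
    (h14 : (14:Int)∣a) (h11 : (11:Int)∣a) (h13 : (13:Int)∣a)
    (h17 : (17:Int)∣a) (h19 : (19:Int)∣a) : (232792560:Int) ∣ a := by
  have h9 : (9:Int) ∣ a := dvd_trans (by norm_num) h18
  have h5 : (5:Int) ∣ a := dvd_trans (by norm_num) h20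
  have h7 : (7:Int) ∣ a := dvd_trans (by norm_num) h14
  have c1 : IsCoprime (16:Int) 9 := Int.isCoprime_iff_gcd_eq_one.mpr (by norm_num)
  have d1 : (144:Int) ∣ a := by have := c1.mul_dvd h16 h9; norm_num at this; exact this
  have c2 : IsCoprime (144:Int) 5 := Int.isCoprime_iff_gcd_eq_one.mpr (by norm_num)
  have d2 : (720:Int) ∣ a := by have := c2.mul_dvd d1 h5; norm_num at this; exact this
  have c3 : IsCoprime (720:Int) 7 := Int.isCoprime_iff_gcd_eq_one.mpr (by norm_num)
  have d3 : (5040:Int) ∣ a := by have := c3.mul_dvd d2 h7; norm_num at this; exact this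
  have c4 : IsCoprime (5040:Int) 11 := Int.isCoprime_iff_gcd_eq_one.mpr (by norm_num)
  have d4 : (55440:Int) ∣ a := by have := c4.mul_dvd d3 h11; norm_num at this; exact this
  have c5 : IsCoprime (55440:Int) 13 := Int.isCoprime_iff_gcd_eq_one.mpr (by norm_num)
  have d5 : (720720:Int) ∣ a := by have := c5.mul_dvd d4 h13; norm_num at this; exact this
  have c6 : IsCoprime (720720:Int) 17 := Int.isCoprime_iff_gcd_eq_one.mpr (by norm_num)
  have d6 : (12252240:Int) ∣ a := by have := c6.mul_dvd d5 h17; norm_num at this; exact this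
  have c7 : IsCoprime (12252240:Int) 19 := Int.isCoprime_iff_gcd_eq_one.mpr (by norm_num)
  have := c7.mul_dvd d6 h19; norm_num at this; exact this

theorem divisivel_eq_true_iff (a : Int) : divisivel a = true ↔ (232792560:Int) ∣ a := by
  have hrange : PySem.List.pyRange 20 10 (-1) = [20,19,18,17,16,15,14,13,12,11] := by decide
  constructor
  · intro h
    unfold divisivel at h
    by_cases h2 : PySem.Int.mod a 2 = 0
    · rw [if_neg (fun hc => absurd h2 (bne_iff_ne.mp hc))] at h
      have hall := (divisivelLoop_eq_true_iff a _).mp h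
      rw [hrange] at hall
      simp only [List.mem_cons, List.not_mem_nil, PySem.Int.mod_eq_zero_iff_dvd] at hall
      exact dvd_lcm_of_all a (hall 16 (by norm_num)) (hall 18 (by norm_num))
        (hall 20 (by norm_num)) (hall 14 (by norm_num)) (hall 11 (by norm_num))
        (hall 13 (by norm_num)) (hall 17 (by norm_num)) (hall 19 (by norm_num))
    · rw [if_pos (bne_iff_ne.mpr h2)] at h; exact absurd h (by simp)
  · intro hL
    have hb : ∀ b : Int, b ∣ (232792560:Int) → PySem.Int.mod a b = 0 := fun b hb =>
      (PySem.Int.mod_eq_zero_iff_dvd a b).mpr (dvd_trans hb hL)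
    unfold divisivel
    rw [if_neg (fun hc => absurd (hb 2 (by norm_num)) (bne_iff_ne.mp hc))]
    rw [divisivelLoop_eq_true_iff, hrange]
    intro b hbmem
    fin_cases hbmem <;> exact hb _ (by norm_num)

-- ===== VERDICT (by name: the statement is the Claim_ definition above) =====
theorem divisivel_spec : Claim_equal_divisivel := by
  intro a _
  show divisivel a = divisivel_alt a
  by_cases hL : (232792560:Int) ∣ a
  · rw [(divisivel_eq_true_iff a).mpr hL]
    simp [divisivel_alt, hL]
  · have hf : divisivel a = false := by
      cases hb : divisivel a
      · rfl
      · exact absurd ((divisivel_eq_true_iff a).mp hb) hL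
    rw [hf]
    simp [divisivel_alt, hL]
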